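-- pv_equiv track=rewrite | github.com/bolt162/Valkyrie | backend/attack_engine.py | calculate_risk_score
-- ===== SOURCE A (Python) =====
-- from typing import List, Dict, Any, Optional
--
-- def calculate_risk_score(findings: List[Dict]) -> str:
--     if not findings:
--         return "Low"
--
--     severity_weights = {"Critical": 4, "High": 3, "Medium": 2, "Low": 1}
--     total_weight = sum(severity_weights.get(f.get("severity", "Low"), 1) for f in findings)
--
--     if total_weight >= 10 or any(f.get("severity") == "Critical" for f in findings):
--         return "High"
--     elif total_weight >= 5:
--         return "Medium"
--     else:
--         return "Low"
-- ===== SOURCE B (Python) =====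
-- from typing import List, Dict, Any, Optional
--
-- def calculate_risk_score(findings: List[Dict]) -> str:
--     severity_weights = {"Critical": 4, "High": 3, "Medium": 2, "Low": 1}
--     acc = 0
--     for f in findings:
--         sev = f.get("severity", "Low")
--         if sev == "Critical":
--             return "High"
--         acc += severity_weights.get(sev, 1)
--         if acc >= 10:
--             return "High"
--     return "Medium" if acc >= 5 else "Low"
-- ===== Notes on version B (the rewrite author's own statement) =====
-- stated objective: alternative
-- what changed: B replaces A's two staged full passes (a weight sum then an any() scan for Critical) by one short-circuiting pass with a running accumulator that returns 'High' immediately on the first Critical finding or as soon as the accumulated weight reaches 10, classifying the remainder only at the end; correct because weights are all >= 1 so partial sums are monotone.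
import Mathlib
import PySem

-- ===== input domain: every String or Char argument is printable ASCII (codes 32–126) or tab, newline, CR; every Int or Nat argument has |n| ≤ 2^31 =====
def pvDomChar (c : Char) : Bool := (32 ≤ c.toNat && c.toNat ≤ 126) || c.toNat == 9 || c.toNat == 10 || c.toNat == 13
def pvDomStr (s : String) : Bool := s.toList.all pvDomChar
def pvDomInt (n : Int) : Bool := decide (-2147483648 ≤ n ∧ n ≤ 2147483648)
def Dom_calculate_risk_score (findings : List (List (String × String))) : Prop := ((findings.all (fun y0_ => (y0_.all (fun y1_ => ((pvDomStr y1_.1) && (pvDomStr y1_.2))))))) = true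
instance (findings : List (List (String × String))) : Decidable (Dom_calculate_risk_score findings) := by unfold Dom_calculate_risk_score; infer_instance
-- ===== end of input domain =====

-- B replaces A's two staged full passes (weight sum, then any() for Critical) by one
-- short-circuiting pass with a running accumulator; alternative decomposition, same cost.

-- ===== PORT A =====
def pvWeights : PySem.Dict String Int :=
  PySem.Dict.ofList [("Critical", 4), ("High", 3), ("Medium", 2), ("Low", 1)]

def calculate_risk_score (findings : List (List (String × String))) : String :=
  if findings = [] then "Low"
  else
    let total_weight : Int :=
      (findings.map (fun f => pvWeights.getD ((PySem.Dict.mk f).getD "severity" "Low") 1)).sum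
    if 10 ≤ total_weight ∨ findings.any (fun f => (PySem.Dict.mk f).get? "severity" == some "Critical") = true then "High"
    else if 5 ≤ total_weight then "Medium"
    else "Low"

-- ===== PORT B =====
-- the for-loop of Source B with its two early returns, as structural recursion on the list
def pvGoB : List (List (String × String)) → Int → String
  | [], acc => if 5 ≤ acc then "Medium" else "Low"
  | f :: rest, acc =>
    let sev := (PySem.Dict.mk f).getD "severity" "Low"
    if sev = "Critical" then "High"
    else
      let acc' := acc + pvWeights.getD sev 1
      if 10 ≤ acc' then "High" else pvGoB rest acc'

def calculate_risk_score_alt (findings : List (List (String × String))) : String :=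
  pvGoB findings 0

-- ===== PRECONDITION & SPEC =====
def Spec_calculate_risk_score (findings : List (List (String × String))) (out : String) : Prop := out = calculate_risk_score_alt findings
instance (findings : List (List (String × String))) (out : String) : Decidable (Spec_calculate_risk_score findings out) := by unfold Spec_calculate_risk_score; infer_instance

-- ===== CLAIM (what is proved, stated in full; the proofs are below) =====
def Claim_equal_calculate_risk_score : Prop := ∀ (findings : List (List (String × String))), Dom_calculate_risk_score findings → Spec_calculate_risk_score findings (calculate_risk_score findings)

-- ===== LEMMAS AND PROOFS =====

-- every severity weight is at least 1
theorem pv_weight_ge_one (k : String) : 1 ≤ pvWeights.getD k 1 := by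
  have hmk : pvWeights = PySem.Dict.mk [("Critical", 4), ("High", 3), ("Medium", 2), ("Low", 1)] := by
    decide
  rw [hmk, PySem.Dict.getD_eq_get?_getD]
  simp only [PySem.Dict.get?_mk_cons]
  by_cases h1 : "Critical" = k <;> by_cases h2 : "High" = k <;> by_cases h3 : "Medium" = k <;>
    by_cases h4 : "Low" = k <;>
      simp_all [PySem.Dict.get?]

def pvW (findings : List (List (String × String))) : Int :=
  (findings.map (fun f => pvWeights.getD ((PySem.Dict.mk f).getD "severity" "Low") 1)).sum

theorem pvW_nonneg (findings : List (List (String × String))) : 0 ≤ pvW findings := by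
  induction findings with
  | nil => simp [pvW]
  | cons f t ih =>
    have h := pv_weight_ge_one ((PySem.Dict.mk f).getD "severity" "Low")
    simp only [pvW, List.map_cons, List.sum_cons] at *
    omega

-- f.get("severity") == "Critical"  ↔  f.get("severity", "Low") == "Critical"
theorem pv_crit_iff (f : List (String × String)) :
    (((PySem.Dict.mk f).get? "severity" == some "Critical") = true) ↔
      (PySem.Dict.mk f).getD "severity" "Low" = "Critical" := by
  cases hv : (PySem.Dict.mk f).get? "severity" with
  | none => simp [PySem.Dict.getD, hv]
  | some v => simp only [PySem.Dict.getD, hv, Option.getD_some, beq_iff_eq, Option.some.injEq]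

-- loop invariant: with acc < 10, the short-circuiting loop computes A's classification
theorem pvGoB_eq (t : List (List (String × String))) :
    ∀ acc : Int, acc < 10 →
      pvGoB t acc =
        if 10 ≤ acc + pvW t ∨ t.any (fun f => (PySem.Dict.mk f).get? "severity" == some "Critical") = true then "High"
        else if 5 ≤ acc + pvW t then "Medium"
        else "Low" := by
  induction t with
  | nil =>
    intro acc hacc
    simp only [pvGoB, pvW, List.map_nil, List.sum_nil, List.any_nil, add_zero]
    have h : ¬ (10 ≤ acc ∨ (false : Bool) = true) := by
      simp only [Bool.false_eq_true, or_false]; omega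
    rw [if_neg h]
  | cons f t ih =>
    intro acc hacc
    simp only [pvGoB]
    set sev := (PySem.Dict.mk f).getD "severity" "Low" with hsev
    have hWc : pvW (f :: t) = pvWeights.getD sev 1 + pvW t := by
      simp [pvW, hsev]
    by_cases hcrit : sev = "Critical"
    · have hany : (f :: t).any (fun f => (PySem.Dict.mk f).get? "severity" == some "Critical") = true := by
        simp only [List.any_cons, Bool.or_eq_true]
        exact Or.inl ((pv_crit_iff f).mpr hcrit)
      rw [if_pos hcrit, if_pos (Or.inr hany)]
    · rw [if_neg hcrit]
      have hanyc : (f :: t).any (fun g => (PySem.Dict.mk g).get? "severity" == some "Critical")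
          = t.any (fun g => (PySem.Dict.mk g).get? "severity" == some "Critical") := by
        simp only [List.any_cons]
        have : ((PySem.Dict.mk f).get? "severity" == some "Critical") = false := by
          by_contra h
          exact hcrit ((pv_crit_iff f).mp (by revert h; cases ((PySem.Dict.mk f).get? "severity" == some "Critical") <;> simp))
        rw [this, Bool.false_or]
      by_cases hten : 10 ≤ acc + pvWeights.getD sev 1
      · have := pvW_nonneg t
        rw [if_pos hten, if_pos (Or.inl (by rw [hWc]; omega))]
      · rw [if_neg hten]
        have hlt : acc + pvWeights.getD sev 1 < 10 := by omega
        rw [ih _ hlt, hanyc, hWc]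
        have harr : acc + (pvWeights.getD sev 1 + pvW t) = acc + pvWeights.getD sev 1 + pvW t := by ring
        rw [harr]

theorem calculate_risk_score_eq (findings : List (List (String × String))) :
    calculate_risk_score findings = calculate_risk_score_alt findings := by
  cases findings with
  | nil => rfl
  | cons f t =>
    have hne : (f :: t) ≠ ([] : List (List (String × String))) := by simp
    rw [calculate_risk_score_alt, pvGoB_eq (f :: t) 0 (by norm_num)]
    simp only [calculate_risk_score, if_neg hne, zero_add, pvW]

-- ===== VERDICT (by name: the statement is the Claim_ definition above) =====
theorem calculate_risk_score_spec : Claim_equal_calculate_risk_score := by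
  intro findings _
  exact calculate_risk_score_eq findings
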